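-- pv_equiv track=rewrite | github.com/10xr-agents/browse-automation-service | navigator/temporal/workflows/helpers/source_detection.py | detect_source_type
-- ===== SOURCE A (Python) =====
-- def detect_source_type(source_url: str | None, provided_type: str | None) -> str:
-- 	"""
-- 	Auto-detect source type from URL or file path.
--
-- 	Intelligently detects whether an asset is a video, documentation file, or website
-- 	based on file extension or URL pattern.
--
-- 	Args:
-- 		source_url: URL or file path
-- 		provided_type: Explicitly provided source type (if any)
--
-- 	Returns:
-- 		Detected source type string
-- 	"""
-- 	if not source_url:
-- 		return provided_type or 'website_documentation'
--
-- 	# If type explicitly provided and not 'file', use it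
-- 	if provided_type and provided_type != 'file':
-- 		return provided_type
--
-- 	# Auto-detect from file extension or URL
-- 	source_lower = source_url.lower()
--
-- 	# Check for video extensions
-- 	if any(source_lower.endswith(ext) for ext in ['.mp4', '.webm', '.mov', '.avi', '.mkv']):
-- 		return 'video_walkthrough'
--
-- 	# Check for documentation file extensions
-- 	if any(source_lower.endswith(ext) for ext in ['.pdf', '.md', '.txt', '.html', '.rst', '.docx', '.doc']):
-- 		return 'technical_documentation'
--
-- 	# Check for file:// URLs (S3 downloads)
-- 	if source_url.startswith('file://'):
-- 		# Default to documentation for file:// URLs (will be refined by router)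
-- 		return 'technical_documentation'
--
-- 	# Check for HTTP(S) URLs
-- 	if source_url.startswith('http://') or source_url.startswith('https://'):
-- 		return 'website_documentation'
--
-- 	# Default fallback
-- 	return provided_type or 'website_documentation'
-- ===== SOURCE B (Python) =====
-- # B: feature-extraction instead of pattern scanning -- one rpartition pulls the
-- # last-dot extension, one partition pulls the URL scheme, and two lookup tables
-- # plus a single chained-or expression replace A's endswith/startswith if-chain.
-- _EXT = {
--     'mp4': 'video_walkthrough', 'webm': 'video_walkthrough',
--     'mov': 'video_walkthrough', 'avi': 'video_walkthrough',
--     'mkv': 'video_walkthrough',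
--     'pdf': 'technical_documentation', 'md': 'technical_documentation',
--     'txt': 'technical_documentation', 'html': 'technical_documentation',
--     'rst': 'technical_documentation', 'docx': 'technical_documentation',
--     'doc': 'technical_documentation',
-- }
-- _SCHEME = {
--     'file': 'technical_documentation',
--     'http': 'website_documentation',
--     'https': 'website_documentation',
-- }
--
--
-- def detect_source_type(source_url, provided_type):
--     if not source_url:
--         return provided_type or 'website_documentation'
--     if provided_type and provided_type != 'file':
--         return provided_type
--     _, dot, ext = source_url.lower().rpartition('.')
--     scheme, sep, _ = source_url.partition('://')
--     return ((dot and _EXT.get(ext)) or (sep and _SCHEME.get(scheme))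
--             or provided_type or 'website_documentation')
-- ===== Notes on version B (the rewrite author's own statement) =====
-- stated objective: idiomatic
-- what changed: B extracts two features once -- the last-dot extension via rpartition('.') and the URL scheme via partition('://') -- and resolves the answer by two table lookups folded into one chained-or expression, replacing A's twelve any(endswith) suffix scans and three startswith branch tests.
import Mathlib
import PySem

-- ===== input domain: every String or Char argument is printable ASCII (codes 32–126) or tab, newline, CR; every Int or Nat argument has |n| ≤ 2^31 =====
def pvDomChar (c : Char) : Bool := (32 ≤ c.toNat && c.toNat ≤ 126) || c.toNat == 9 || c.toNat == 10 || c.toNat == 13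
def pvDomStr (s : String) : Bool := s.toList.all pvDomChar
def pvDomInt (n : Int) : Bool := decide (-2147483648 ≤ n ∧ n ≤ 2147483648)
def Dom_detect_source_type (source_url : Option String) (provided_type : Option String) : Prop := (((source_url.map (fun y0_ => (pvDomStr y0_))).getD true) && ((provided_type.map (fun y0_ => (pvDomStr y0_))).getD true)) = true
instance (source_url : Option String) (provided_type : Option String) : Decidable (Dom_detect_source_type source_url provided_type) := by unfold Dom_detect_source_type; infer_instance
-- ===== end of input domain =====

-- B classifies by extracting two features (last-dot extension, '://'-scheme) once and
-- resolving them through lookup tables in one chained-or, instead of A's endswith/startswith if-chain.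


-- ===== PORT A =====
-- `provided_type or 'website_documentation'` (None and '' are falsy)
def pvOrDefault (provided_type : Option String) : String :=
  match provided_type with
  | none => "website_documentation"
  | some t => if t == "" then "website_documentation" else t

-- `provided_type and provided_type != 'file'`
def pvTruthyNeFile (provided_type : Option String) : Bool :=
  match provided_type with
  | none => false
  | some t => t != "" && t != "file"

def detect_source_type (source_url : Option String) (provided_type : Option String) : String :=
  match source_url with
  | none => pvOrDefault provided_type
  | some s =>
    if s == "" then pvOrDefault provided_type
    else if pvTruthyNeFile provided_type then provided_type.getD ""
    else
      let source_lower := PySem.Str.lower s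
      if [".mp4", ".webm", ".mov", ".avi", ".mkv"].any
          (fun ext => PySem.Str.endswith source_lower ext) then "video_walkthrough"
      else if [".pdf", ".md", ".txt", ".html", ".rst", ".docx", ".doc"].any
          (fun ext => PySem.Str.endswith source_lower ext) then "technical_documentation"
      else if PySem.Str.startswith s "file://" then "technical_documentation"
      else if PySem.Str.startswith s "http://" || PySem.Str.startswith s "https://" then "website_documentation"
      else pvOrDefault provided_type

-- ===== PORT B =====
-- Source B's _EXT: bare last-dot extension -> type
def pvExtTable : PySem.Dict (List Char) String := PySem.Dict.ofList
  [("mp4".toList, "video_walkthrough"), ("webm".toList, "video_walkthrough"),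
   ("mov".toList, "video_walkthrough"), ("avi".toList, "video_walkthrough"),
   ("mkv".toList, "video_walkthrough"), ("pdf".toList, "technical_documentation"),
   ("md".toList, "technical_documentation"), ("txt".toList, "technical_documentation"),
   ("html".toList, "technical_documentation"), ("rst".toList, "technical_documentation"),
   ("docx".toList, "technical_documentation"), ("doc".toList, "technical_documentation")]

-- Source B's _SCHEME: URL scheme -> type
def pvSchemeTable : PySem.Dict (List Char) String := PySem.Dict.ofList
  [("file".toList, "technical_documentation"),
   ("http".toList, "website_documentation"),
   ("https".toList, "website_documentation")]

-- `cs.rpartition('.')[2]` when '.' occurs in cs (the only case Source B consumes it)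
def pvAfterLastDot (cs : List Char) : List Char :=
  (cs.reverse.takeWhile (fun c => !(c == '.'))).reverse

-- `s.partition('://')[0]` together with the found flag: the text before the FIRST
-- occurrence of '://' (none when '://' does not occur) — hand port, exact
def pvSchemeHead : List Char → Option (List Char)
  | [] => none
  | c :: rest =>
    if c = ':' ∧ rest.take 2 = ['/', '/'] then some []
    else match pvSchemeHead rest with
         | some h => some (c :: h)
         | none => none

def pvDefaultB (provided_type : Option String) : String :=
  match provided_type with
  | none => "website_documentation"
  | some t => if t == "" then "website_documentation" else t

def detect_source_type_alt (source_url : Option String) (provided_type : Option String) : String :=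
  match source_url with
  | none => pvDefaultB provided_type
  | some s =>
    if s == "" then pvDefaultB provided_type
    else if (match provided_type with
             | none => false
             | some t => t != "" && t != "file") then provided_type.getD ""
    else
      let low := (PySem.Str.lower s).toList
      -- (dot and _EXT.get(ext))
      let hitE : Option String :=
        if low.contains '.' then PySem.Dict.get? pvExtTable (pvAfterLastDot low) else none
      -- (sep and _SCHEME.get(scheme))
      let hitS : Option String :=
        match pvSchemeHead s.toList with
        | some h => PySem.Dict.get? pvSchemeTable h
        | none => none
      match hitE with
      | some t => t
      | none =>
        match hitS with
        | some t => t
        | none => pvDefaultB provided_type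

-- ===== PRECONDITION & SPEC =====
def Spec_detect_source_type (source_url : Option String) (provided_type : Option String) (out : String) : Prop := out = detect_source_type_alt source_url provided_type
instance (source_url : Option String) (provided_type : Option String) (out : String) : Decidable (Spec_detect_source_type source_url provided_type out) := by unfold Spec_detect_source_type; infer_instance

-- ===== CLAIM =====
def Claim_equal_detect_source_type : Prop := ∀ (source_url : Option String) (provided_type : Option String), Dom_detect_source_type source_url provided_type → Spec_detect_source_type source_url provided_type (detect_source_type source_url provided_type)

-- ===== LEMMAS AND PROOFS =====

-- a list ends with '.'::e (e dot-free) iff it contains a dot and e is exactly the part after the last dot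
lemma suffix_dot_iff (sl e : List Char) (he : '.' ∉ e) :
    ('.' :: e) <:+ sl ↔ ('.' ∈ sl ∧ pvAfterLastDot sl = e) := by
  constructor
  · rintro ⟨pre, rfl⟩
    refine ⟨by simp, ?_⟩
    unfold pvAfterLastDot
    rw [List.reverse_append]
    have hall : e.reverse.takeWhile (fun c => !(c == '.')) = e.reverse := by
      rw [List.takeWhile_eq_self_iff]
      intro x hx
      simp only [List.mem_reverse] at hx
      simp only [Bool.not_eq_true', beq_eq_false_iff_ne]
      exact fun h => he (h ▸ hx)
    rw [show ('.' :: e).reverse = e.reverse ++ ['.'] by simp, List.append_assoc,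
        List.takeWhile_append, hall]
    simp
  · rintro ⟨hc, hx⟩
    set p : Char → Bool := fun c => !(c == '.') with hp
    have hd : sl.reverse.dropWhile p ≠ [] := by
      intro h
      have : sl.reverse.takeWhile p = sl.reverse := by
        have := List.takeWhile_append_dropWhile (p := p) (l := sl.reverse)
        rw [h, List.append_nil] at this; exact this
      rw [List.takeWhile_eq_self_iff] at this
      have := this '.' (by simpa using hc)
      simp [hp] at this
    obtain ⟨c, d', hd'⟩ := List.exists_cons_of_ne_nil hd
    have hchead : p c = false := by
      have h2 := List.head_dropWhile_not p hd
      simp only [hd', List.head_cons] at h2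
      exact h2
    have hcdot : c = '.' := by simpa [hp] using hchead
    refine ⟨d'.reverse, ?_⟩
    have hsplit := List.takeWhile_append_dropWhile (p := p) (l := sl.reverse)
    have : sl = (sl.reverse.dropWhile p).reverse ++ (sl.reverse.takeWhile p).reverse := by
      rw [← List.reverse_append, hsplit, List.reverse_reverse]
    rw [this, hd', hcdot]
    unfold pvAfterLastDot at hx
    simp only [List.reverse_cons, List.append_assoc, List.singleton_append]
    rw [hx]

lemma endswith_eq_decide (sl e : List Char) (he : '.' ∉ e) :
    PySem.Chars.endswith sl ('.' :: e) =
      decide ('.' ∈ sl ∧ pvAfterLastDot sl = e) := by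
  rw [Bool.eq_iff_iff, PySem.Chars.endswith_iff, suffix_dot_iff sl e he, decide_eq_true_eq]

-- B's extension lookup equals A's two any(endswith) scans
lemma hit_eq (sl : List Char) :
    (if sl.contains '.' then PySem.Dict.get? pvExtTable (pvAfterLastDot sl) else none)
    = (if [".mp4", ".webm", ".mov", ".avi", ".mkv"].any (fun e => PySem.Chars.endswith sl e.toList) then some "video_walkthrough"
       else if [".pdf", ".md", ".txt", ".html", ".rst", ".docx", ".doc"].any (fun e => PySem.Chars.endswith sl e.toList) then some "technical_documentation"
       else none) := by
  have h1 : (".mp4".toList : List Char) = '.' :: "mp4".toList := rfl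
  have h2 : (".webm".toList : List Char) = '.' :: "webm".toList := rfl
  have h3 : (".mov".toList : List Char) = '.' :: "mov".toList := rfl
  have h4 : (".avi".toList : List Char) = '.' :: "avi".toList := rfl
  have h5 : (".mkv".toList : List Char) = '.' :: "mkv".toList := rfl
  have h6 : (".pdf".toList : List Char) = '.' :: "pdf".toList := rfl
  have h7 : (".md".toList : List Char) = '.' :: "md".toList := rfl
  have h8 : (".txt".toList : List Char) = '.' :: "txt".toList := rfl
  have h9 : (".html".toList : List Char) = '.' :: "html".toList := rfl
  have h10 : (".rst".toList : List Char) = '.' :: "rst".toList := rfl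
  have h11 : (".docx".toList : List Char) = '.' :: "docx".toList := rfl
  have h12 : (".doc".toList : List Char) = '.' :: "doc".toList := rfl
  simp only [List.any_cons, List.any_nil, h1, h2, h3, h4, h5, h6, h7, h8, h9, h10, h11, h12,
    Bool.or_false]
  rw [endswith_eq_decide sl "mp4".toList (by decide),
      endswith_eq_decide sl "webm".toList (by decide),
      endswith_eq_decide sl "mov".toList (by decide),
      endswith_eq_decide sl "avi".toList (by decide),
      endswith_eq_decide sl "mkv".toList (by decide),
      endswith_eq_decide sl "pdf".toList (by decide),
      endswith_eq_decide sl "md".toList (by decide),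
      endswith_eq_decide sl "txt".toList (by decide),
      endswith_eq_decide sl "html".toList (by decide),
      endswith_eq_decide sl "rst".toList (by decide),
      endswith_eq_decide sl "docx".toList (by decide),
      endswith_eq_decide sl "doc".toList (by decide)]
  cases hc : sl.contains '.' with
  | false =>
    have hmem : '.' ∉ sl := by simpa using hc
    simp [hmem]
  | true =>
    have hmem : '.' ∈ sl := by simpa using hc
    simp only [hmem, true_and, if_true]
    set x := pvAfterLastDot sl with hxdef
    by_cases e1 : x = "mp4".toList
    · rw [e1]; decide
    by_cases e2 : x = "webm".toList
    · rw [e2]; decide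
    by_cases e3 : x = "mov".toList
    · rw [e3]; decide
    by_cases e4 : x = "avi".toList
    · rw [e4]; decide
    by_cases e5 : x = "mkv".toList
    · rw [e5]; decide
    by_cases e6 : x = "pdf".toList
    · rw [e6]; decide
    by_cases e7 : x = "md".toList
    · rw [e7]; decide
    by_cases e8 : x = "txt".toList
    · rw [e8]; decide
    by_cases e9 : x = "html".toList
    · rw [e9]; decide
    by_cases e10 : x = "rst".toList
    · rw [e10]; decide
    by_cases e11 : x = "docx".toList
    · rw [e11]; decide
    by_cases e12 : x = "doc".toList
    · rw [e12]; decide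
    have p1 : ¬ x = (['m','p','4'] : List Char) := e1
    have p2 : ¬ x = (['w','e','b','m'] : List Char) := e2
    have p3 : ¬ x = (['m','o','v'] : List Char) := e3
    have p4 : ¬ x = (['a','v','i'] : List Char) := e4
    have p5 : ¬ x = (['m','k','v'] : List Char) := e5
    have p6 : ¬ x = (['p','d','f'] : List Char) := e6
    have p7 : ¬ x = (['m','d'] : List Char) := e7
    have p8 : ¬ x = (['t','x','t'] : List Char) := e8
    have p9 : ¬ x = (['h','t','m','l'] : List Char) := e9
    have p10 : ¬ x = (['r','s','t'] : List Char) := e10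
    have p11 : ¬ x = (['d','o','c','x'] : List Char) := e11
    have p12 : ¬ x = (['d','o','c'] : List Char) := e12
    have b1 : ((['m','p','4'] : List Char) == x) = false := beq_eq_false_iff_ne.mpr (Ne.symm e1)
    have b2 : ((['w','e','b','m'] : List Char) == x) = false := beq_eq_false_iff_ne.mpr (Ne.symm e2)
    have b3 : ((['m','o','v'] : List Char) == x) = false := beq_eq_false_iff_ne.mpr (Ne.symm e3)
    have b4 : ((['a','v','i'] : List Char) == x) = false := beq_eq_false_iff_ne.mpr (Ne.symm e4)
    have b5 : ((['m','k','v'] : List Char) == x) = false := beq_eq_false_iff_ne.mpr (Ne.symm e5)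
    have b6 : ((['p','d','f'] : List Char) == x) = false := beq_eq_false_iff_ne.mpr (Ne.symm e6)
    have b7 : ((['m','d'] : List Char) == x) = false := beq_eq_false_iff_ne.mpr (Ne.symm e7)
    have b8 : ((['t','x','t'] : List Char) == x) = false := beq_eq_false_iff_ne.mpr (Ne.symm e8)
    have b9 : ((['h','t','m','l'] : List Char) == x) = false := beq_eq_false_iff_ne.mpr (Ne.symm e9)
    have b10 : ((['r','s','t'] : List Char) == x) = false := beq_eq_false_iff_ne.mpr (Ne.symm e10)
    have b11 : ((['d','o','c','x'] : List Char) == x) = false := beq_eq_false_iff_ne.mpr (Ne.symm e11)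
    have b12 : ((['d','o','c'] : List Char) == x) = false := beq_eq_false_iff_ne.mpr (Ne.symm e12)
    simp [PySem.Dict.get?, pvExtTable, PySem.Dict.ofList, PySem.Dict.update, PySem.Dict.insert,
      PySem.Dict.empty, List.find?, p1, p2, p3, p4, p5, p6, p7, p8, p9, p10, p11, p12,
      b1, b2, b3, b4, b5, b6, b7, b8, b9, b10, b11, b12]

-- partition head of X++'://'++t is X when X has no colon
lemma schemeHead_of_prefix (X t : List Char) (hX : ':' ∉ X) :
    pvSchemeHead (X ++ ':' :: '/' :: '/' :: t) = some X := by
  induction X with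
  | nil => simp [pvSchemeHead]
  | cons c X' ih =>
    have hc : c ≠ ':' := fun h => hX (by simp [h])
    have hX' : ':' ∉ X' := fun h => hX (List.mem_cons_of_mem _ h)
    simp only [List.cons_append, pvSchemeHead]
    rw [if_neg (by exact fun h => hc h.1), ih hX']

lemma prefix_of_schemeHead (s X : List Char) (h : pvSchemeHead s = some X) :
    X ++ [':', '/', '/'] <+: s := by
  induction s generalizing X with
  | nil => simp [pvSchemeHead] at h
  | cons c rest ih =>
    simp only [pvSchemeHead] at h
    split_ifs at h with hg
    · obtain ⟨hc, ht⟩ := hg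
      injection h with h'
      subst h'
      obtain ⟨suf, hsuf⟩ : ∃ suf, rest = '/' :: '/' :: suf := by
        cases rest with
        | nil => simp at ht
        | cons a b =>
          cases b with
          | nil => simp at ht
          | cons a2 b2 =>
            simp only [List.take] at ht
            injection ht with ha hb; injection hb with ha2 _
            exact ⟨b2, by rw [ha, ha2]⟩
      exact ⟨suf, by simp [hc, hsuf]⟩
    · cases hrec : pvSchemeHead rest with
      | none => rw [hrec] at h; exact absurd h (by simp)
      | some hh =>
        rw [hrec] at h
        injection h with h'
        subst h'
        obtain ⟨t, ht⟩ := ih hh hrec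
        exact ⟨t, by simp [← ht]⟩

lemma startswith_iff_head (s X : List Char) (hX : ':' ∉ X) :
    (X ++ [':', '/', '/']) <+: s ↔ pvSchemeHead s = some X := by
  constructor
  · rintro ⟨t, rfl⟩
    have : X ++ [':', '/', '/'] ++ t = X ++ ':' :: '/' :: '/' :: t := by simp
    rw [this]
    exact schemeHead_of_prefix X t hX
  · exact prefix_of_schemeHead s X

-- B's scheme lookup equals A's three startswith tests
lemma scheme_eq (s : List Char) :
    (match pvSchemeHead s with
     | some h => PySem.Dict.get? pvSchemeTable h
     | none => none)
    = (if PySem.Chars.startswith s "file://".toList then some "technical_documentation"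
       else if PySem.Chars.startswith s "http://".toList || PySem.Chars.startswith s "https://".toList then some "website_documentation"
       else none) := by
  have hf : PySem.Chars.startswith s "file://".toList = decide (pvSchemeHead s = some "file".toList) := by
    rw [Bool.eq_iff_iff, PySem.Chars.startswith_iff, decide_eq_true_eq]
    exact startswith_iff_head s "file".toList (by decide)
  have hh : PySem.Chars.startswith s "http://".toList = decide (pvSchemeHead s = some "http".toList) := by
    rw [Bool.eq_iff_iff, PySem.Chars.startswith_iff, decide_eq_true_eq]
    exact startswith_iff_head s "http".toList (by decide)
  have hs : PySem.Chars.startswith s "https://".toList = decide (pvSchemeHead s = some "https".toList) := by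
    rw [Bool.eq_iff_iff, PySem.Chars.startswith_iff, decide_eq_true_eq]
    exact startswith_iff_head s "https".toList (by decide)
  rw [hf, hh, hs]
  cases hhead : pvSchemeHead s with
  | none => simp
  | some X =>
    simp only [Option.some.injEq, decide_eq_true_eq]
    by_cases e1 : X = "file".toList
    · rw [e1]; simp; decide
    by_cases e2 : X = "http".toList
    · rw [e2]; simp; decide
    by_cases e3 : X = "https".toList
    · rw [e3]; simp; decide
    have q1 : ¬ X = (['f','i','l','e'] : List Char) := e1
    have q2 : ¬ X = (['h','t','t','p'] : List Char) := e2
    have q3 : ¬ X = (['h','t','t','p','s'] : List Char) := e3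
    have b1 : ((['f','i','l','e'] : List Char) == X) = false := beq_eq_false_iff_ne.mpr (Ne.symm e1)
    have b2 : ((['h','t','t','p'] : List Char) == X) = false := beq_eq_false_iff_ne.mpr (Ne.symm e2)
    have b3 : ((['h','t','t','p','s'] : List Char) == X) = false := beq_eq_false_iff_ne.mpr (Ne.symm e3)
    simp [PySem.Dict.get?, pvSchemeTable, PySem.Dict.ofList, PySem.Dict.update, PySem.Dict.insert,
      PySem.Dict.empty, List.find?, q1, q2, q3, b1, b2, b3]

-- after all guards fail, A's detection body equals B's feature-table body
lemma core_eq (s : String) (pt : Option String) :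
    (let source_lower := PySem.Str.lower s
     if [".mp4", ".webm", ".mov", ".avi", ".mkv"].any
         (fun ext => PySem.Str.endswith source_lower ext) then "video_walkthrough"
     else if [".pdf", ".md", ".txt", ".html", ".rst", ".docx", ".doc"].any
         (fun ext => PySem.Str.endswith source_lower ext) then "technical_documentation"
     else if PySem.Str.startswith s "file://" then "technical_documentation"
     else if PySem.Str.startswith s "http://" || PySem.Str.startswith s "https://" then "website_documentation"
     else pvOrDefault pt)
    = (let low := (PySem.Str.lower s).toList
       let hitE : Option String :=
         if low.contains '.' then PySem.Dict.get? pvExtTable (pvAfterLastDot low) else none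
       let hitS : Option String :=
         match pvSchemeHead s.toList with
         | some h => PySem.Dict.get? pvSchemeTable h
         | none => none
       match hitE with
       | some t => t
       | none =>
         match hitS with
         | some t => t
         | none => pvDefaultB pt) := by
  have HE := hit_eq ((PySem.Str.lower s).toList)
  have HS := scheme_eq s.toList
  simp only [PySem.Str.endswith_eq, PySem.Str.startswith_eq]
  rw [HE, HS]
  split_ifs <;> rfl

-- ===== VERDICT =====
theorem detect_source_type_spec : Claim_equal_detect_source_type := by
  intro su pt _
  unfold Spec_detect_source_type
  cases su with
  | none => rfl
  | some s =>
    simp only [detect_source_type, detect_source_type_alt, pvTruthyNeFile]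
    by_cases hs : (s == "") = true
    · simp [hs, pvOrDefault, pvDefaultB]
    · simp only [Bool.not_eq_true] at hs
      simp only [hs, Bool.false_eq_true, if_false]
      cases pt with
      | none => exact core_eq s none
      | some t =>
        by_cases ht : (t != "" && t != "file") = true
        · simp [ht]
        · simp only [Bool.not_eq_true] at ht
          simp only [ht, Bool.false_eq_true, if_false]
          exact core_eq s (some t)
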